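-- pv_equiv track=rewrite | github.com/zoujinhang/my_python | zjh_data_analysis.py | check_rate
-- ===== SOURCE A (Python) =====
-- def check_rate(rate,standard = 10):
-- 	check = 0
-- 	n = len(rate)-1
--
-- 	for index in range(1,n):
-- 		if((rate[index] == 0)&(rate[index-1] == 0)&(rate[index+1] == 0)):
-- 			check = check+1
-- 			if(check > standard):
-- 				return False
-- 		else:
-- 			check = 0
-- 	return True
-- ===== SOURCE B (Python) =====
-- def check_rate(rate, standard=10):
--     # A run of k consecutive triple-zero centers corresponds exactly to a run of
--     # k+2 consecutive zeros in rate, so scan rate once for its longest zero run.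
--     longest = 0
--     current = 0
--     for x in rate:
--         if x == 0:
--             current = current + 1
--             if current > longest:
--                 longest = current
--         else:
--             current = 0
--     worst = longest - 2
--     return worst <= 0 or worst <= standard
-- ===== Notes on version B (the rewrite author's own statement) =====
-- stated objective: alternative
-- what changed: Instead of indexing rate[i-1],rate[i],rate[i+1] over range(1,n) with a reset counter and early return, B makes one direct pass over the values computing the longest run of zeros and compares (longest-2) with the standard, using the fact that a run of k triple-zero centers is exactly a zero run of length k+2.
import Mathlib
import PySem

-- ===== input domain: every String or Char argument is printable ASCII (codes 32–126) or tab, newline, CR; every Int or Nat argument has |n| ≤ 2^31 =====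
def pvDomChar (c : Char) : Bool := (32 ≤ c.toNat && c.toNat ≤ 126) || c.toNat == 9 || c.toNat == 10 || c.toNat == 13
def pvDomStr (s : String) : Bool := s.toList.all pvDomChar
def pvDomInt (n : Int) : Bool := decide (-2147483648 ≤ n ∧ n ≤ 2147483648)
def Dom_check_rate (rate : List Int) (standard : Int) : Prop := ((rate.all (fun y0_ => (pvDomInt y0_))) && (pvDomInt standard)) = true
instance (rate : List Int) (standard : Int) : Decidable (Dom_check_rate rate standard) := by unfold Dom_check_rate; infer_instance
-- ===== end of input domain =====

-- B replaces A's indexed triple-zero counter (with early return) by a single pass over the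
-- values computing the longest zero run; objective: alternative decomposition, same cost.

-- ===== PORT A =====
-- A's loop 'for index in range(1, n)' with its early 'return False'; for index ∈ [1, n-1]
-- (n = len-1) the accessed indices index-1, index, index+1 all lie in [0, len-1], so the
-- pyGetD default is never used and the port is exact (no IndexError is reachable).
def check_rate_go (rate : List Int) (standard : Int) : List Int → Int → Bool
  | [], _ => true
  | index :: rest, check =>
    if (PySem.List.pyGetD rate index 0 == 0) && (PySem.List.pyGetD rate (index - 1) 0 == 0)
        && (PySem.List.pyGetD rate (index + 1) 0 == 0) then
      if check + 1 > standard then false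
      else check_rate_go rate standard rest (check + 1)
    else check_rate_go rate standard rest 0

def check_rate (rate : List Int) (standard : Int) : Bool :=
  check_rate_go rate standard (PySem.List.pyRange 1 ((rate.length : Int) - 1) 1) 0

-- ===== PORT B =====
-- loop body of Source B: update (longest, current) for one element
def altStep (lc : Int × Int) (x : Int) : Int × Int :=
  if x == 0 then
    let cur := lc.2 + 1
    (if cur > lc.1 then cur else lc.1, cur)
  else (lc.1, 0)

def check_rate_alt (rate : List Int) (standard : Int) : Bool :=
  let p := rate.foldl altStep (0, 0)
  let worst := p.1 - 2
  decide (worst ≤ 0) || decide (worst ≤ standard)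

-- ===== PRECONDITION & SPEC =====
def Spec_check_rate (rate : List Int) (standard : Int) (out : Bool) : Prop := out = check_rate_alt rate standard
instance (rate : List Int) (standard : Int) (out : Bool) : Decidable (Spec_check_rate rate standard out) := by unfold Spec_check_rate; infer_instance

-- ===== CLAIM (what is proved, stated in full; the proofs are below) =====
def Claim_equal_check_rate : Prop := ∀ (rate : List Int) (standard : Int), Dom_check_rate rate standard → Spec_check_rate rate standard (check_rate rate standard)

-- ===== LEMMAS AND PROOFS =====

-- proof-level reformulation of A's loop on the suffix of rate (sliding window of 3 heads)
def goA (standard : Int) : List Int → Int → Bool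
  | a :: b :: c :: t, check =>
    if a = 0 ∧ b = 0 ∧ c = 0 then
      if check + 1 > standard then false
      else goA standard (b :: c :: t) (check + 1)
    else goA standard (b :: c :: t) 0
  | _, _ => true
  termination_by l _ => l.length

-- longest-zero-run tracker: r = current run, m = longest so far
def mr (r m : Int) : List Int → Int
  | [] => m
  | x :: t => if x = 0 then mr (r + 1) (max m (r + 1)) t else mr 0 m t

theorem altStep_zero (m r x : Int) (hx : x = 0) : altStep (m, r) x = (max m (r + 1), r + 1) := by
  subst hx
  simp only [altStep, BEq.rfl, if_true]
  rcases max_choice m (r + 1) with h | h <;> rw [h] <;> simp <;> omega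

theorem altStep_nz (m r x : Int) (hx : ¬ x = 0) : altStep (m, r) x = (m, 0) := by
  simp [altStep, hx]

theorem foldl_eq_mr : ∀ (s : List Int) (m r : Int), (s.foldl altStep (m, r)).1 = mr r m s := by
  intro s
  induction s with
  | nil => intro m r; simp [mr]
  | cons x t ih =>
    intro m r
    by_cases hx : x = 0
    · rw [List.foldl_cons, altStep_zero m r x hx,
        show mr r m (x :: t) = mr (r + 1) (max m (r + 1)) t from by simp [mr, hx]]
      exact ih (max m (r + 1)) (r + 1)
    · rw [List.foldl_cons, altStep_nz m r x hx,
        show mr r m (x :: t) = mr 0 m t from by simp [mr, hx]]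
      exact ih m 0

theorem mr_ge : ∀ (t : List Int) (r m : Int), m ≤ mr r m t := by
  intro t
  induction t with
  | nil => intro r m; simp [mr]
  | cons x t ih =>
    intro r m
    by_cases hx : x = 0 <;> simp only [mr, hx, if_true, if_false]
    · exact le_trans (le_max_left m (r + 1)) (ih (r + 1) (max m (r + 1)))
    · exact ih 0 m

theorem goA_short (std check : Int) : ∀ (s : List Int), s.length ≤ 2 → goA std s check = true := by
  intro s
  match s with
  | [] => intro _; simp [goA]
  | [_] => intro _; simp [goA]
  | [_, _] => intro _; simp [goA]
  | _ :: _ :: _ :: _ => intro h; simp at h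

theorem goA_cons_pos (std a b c check : Int) (t : List Int) (h : a = 0 ∧ b = 0 ∧ c = 0) :
    goA std (a :: b :: c :: t) check
      = if check + 1 > std then false else goA std (b :: c :: t) (check + 1) := by
  simp only [goA]
  rw [if_pos h]

theorem goA_cons_neg (std a b c check : Int) (t : List Int) (h : ¬ (a = 0 ∧ b = 0 ∧ c = 0)) :
    goA std (a :: b :: c :: t) check = goA std (b :: c :: t) 0 := by
  simp only [goA]
  rw [if_neg h]

-- MAIN invariant: at suffix a :: b :: s, rb is the zero-run length through b, m the longest
-- run over the already processed prefix, check A's counter; the two sides then agree.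
theorem goA_main : ∀ (s : List Int) (a b rb m check std : Int),
    0 ≤ rb →
    (1 ≤ rb ↔ b = 0) →
    (2 ≤ rb → a = 0) →
    (a = 0 → b = 0 → 2 ≤ rb) →
    ((check = rb - 2 ∧ 2 ≤ rb) ∨ (check = 0 ∧ rb ≤ 2)) →
    rb ≤ m →
    (m ≤ 2 ∨ m - 2 ≤ std) →
    goA std (a :: b :: s) check
      = (decide (mr rb m s ≤ 2) || decide (mr rb m s - 2 ≤ std)) := by
  intro s
  induction s with
  | nil =>
    intro a b rb m check std h1 h2 h3 h4 h5 h6 h7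
    rw [show goA std [a, b] check = true from by simp [goA], show mr rb m [] = m from rfl]
    rcases h7 with h | h <;> simp <;> omega
  | cons c t ih =>
    intro a b rb m check std h1 h2 h3 h4 h5 h6 h7
    by_cases hf : a = 0 ∧ b = 0 ∧ c = 0
    · obtain ⟨ha, hb, hc⟩ := hf
      have hrb2 : 2 ≤ rb := h4 ha hb
      have hchk : check = rb - 2 := by omega
      rw [goA_cons_pos std a b c check t ⟨ha, hb, hc⟩]
      rw [show mr rb m (c :: t) = mr (rb + 1) (max m (rb + 1)) t from by simp [mr, hc]]
      have hmx : rb + 1 ≤ max m (rb + 1) := le_max_right m (rb + 1)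
      have hmx2 : m ≤ max m (rb + 1) := le_max_left m (rb + 1)
      have hmax_cases := max_choice m (rb + 1)
      by_cases hret : check + 1 > std
      · rw [if_pos hret]
        have hge := mr_ge t (rb + 1) (max m (rb + 1))
        have hA : ¬ (mr (rb + 1) (max m (rb + 1)) t ≤ 2) := by omega
        have hB : ¬ (mr (rb + 1) (max m (rb + 1)) t - 2 ≤ std) := by omega
        simp [hA, hB]
      · rw [if_neg hret]
        exact ih b c (rb + 1) (max m (rb + 1)) (check + 1) std (by omega)
          (by constructor <;> intro <;> first | exact hc | omega)
          (fun _ => hb) (fun _ _ => by omega)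
          (by omega) hmx (by omega)
    · rw [goA_cons_neg std a b c check t hf]
      by_cases hc : c = 0
      · rw [show mr rb m (c :: t) = mr (rb + 1) (max m (rb + 1)) t from by simp [mr, hc]]
        have hrb1 : rb ≤ 1 := by
          by_cases hb : b = 0
          · by_contra h
            exact hf ⟨h3 (by omega), hb, hc⟩
          · have : ¬ (1 ≤ rb) := fun h => hb (h2.mp h)
            omega
        have hmax_cases := max_choice m (rb + 1)
        have hmx : rb + 1 ≤ max m (rb + 1) := le_max_right m (rb + 1)
        have hmx2 : m ≤ max m (rb + 1) := le_max_left m (rb + 1)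
        exact ih b c (rb + 1) (max m (rb + 1)) 0 std (by omega)
          (by constructor <;> intro <;> first | exact hc | omega)
          (fun _ => h2.mp (by omega)) (fun _ _ => by omega)
          (by omega) hmx (by omega)
      · rw [show mr rb m (c :: t) = mr 0 m t from by simp [mr, hc]]
        exact ih b c 0 m 0 std (le_refl 0)
          (by constructor <;> intro h <;> [omega; exact absurd h hc])
          (by omega) (fun _ hcc => absurd hcc hc)
          (by omega) (by omega) h7

-- bridge: A's indexed loop over range(i, len-1) equals goA on the suffix drop (i-1)
theorem go_eq_goA (rate : List Int) (std : Int) :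
    ∀ (d : Nat) (i check : Int), 1 ≤ i → (((rate.length : Int) - 1 - i).toNat = d) →
    check_rate_go rate std (PySem.List.pyRange i ((rate.length : Int) - 1) 1) check
      = goA std (rate.drop (i - 1).toNat) check := by
  intro d
  induction d with
  | zero =>
    intro i check hi hd
    have hni : (rate.length : Int) - 1 ≤ i := by omega
    rw [PySem.List.pyRange_one_eq_nil hni]
    rw [show check_rate_go rate std [] check = true from rfl]
    rw [goA_short std check _ (by
      have h2 : (i - 1).toNat + 2 ≥ rate.length := by omega
      simp only [List.length_drop]; omega)]
  | succ d ihd =>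
    intro i check hi hd
    have hlt : i < (rate.length : Int) - 1 := by omega
    have hi0 : (0:Int) ≤ i - 1 := by omega
    have hkn : (i - 1).toNat + 2 < rate.length := by omega
    have hk1 : (i - 1).toNat + 1 < rate.length := by omega
    have hk0 : (i - 1).toNat < rate.length := by omega
    rw [PySem.List.pyRange_one_cons hlt]
    have hdrop : rate.drop (i - 1).toNat
        = rate[(i-1).toNat] :: rate[(i-1).toNat + 1] :: rate[(i-1).toNat + 2]
            :: rate.drop ((i-1).toNat + 3) := by
      rw [List.drop_eq_getElem_cons hk0, List.drop_eq_getElem_cons hk1,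
          List.drop_eq_getElem_cons hkn]
    have hga : PySem.List.pyGetD rate (i - 1) 0 = rate[(i-1).toNat] :=
      PySem.List.pyGetD_eq_getElem rate 0 hi0 (by omega)
    have hgb : PySem.List.pyGetD rate i 0 = rate[(i-1).toNat + 1] := by
      rw [PySem.List.pyGetD_eq_getElem rate 0 (by omega) (by omega)]
      congr 1; omega
    have hgc : PySem.List.pyGetD rate (i + 1) 0 = rate[(i-1).toNat + 2] := by
      rw [PySem.List.pyGetD_eq_getElem rate 0 (by omega) (by omega)]
      congr 1; omega
    have htails : rate.drop ((i + 1) - 1).toNat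
        = rate[(i-1).toNat + 1] :: rate[(i-1).toNat + 2] :: rate.drop ((i-1).toNat + 3) := by
      rw [show ((i + 1) - 1).toNat = (i - 1).toNat + 1 from by omega,
          List.drop_eq_getElem_cons hk1, List.drop_eq_getElem_cons hkn]
    have hih1 := ihd (i + 1) (check + 1) (by omega) (by omega)
    have hih0 := ihd (i + 1) 0 (by omega) (by omega)
    rw [htails] at hih1 hih0
    rw [hdrop]
    rw [show check_rate_go rate std (i :: PySem.List.pyRange (i+1) ((rate.length : Int) - 1) 1) check
        = if (PySem.List.pyGetD rate i 0 == 0) && (PySem.List.pyGetD rate (i - 1) 0 == 0)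
              && (PySem.List.pyGetD rate (i + 1) 0 == 0) then
            if check + 1 > std then false
            else check_rate_go rate std (PySem.List.pyRange (i+1) ((rate.length : Int) - 1) 1) (check + 1)
          else check_rate_go rate std (PySem.List.pyRange (i+1) ((rate.length : Int) - 1) 1) 0
        from rfl]
    rw [hga, hgb, hgc]
    set A := rate[(i-1).toNat] with hA
    set B := rate[(i-1).toNat + 1] with hB
    set C := rate[(i-1).toNat + 2] with hC
    by_cases hcond : A = 0 ∧ B = 0 ∧ C = 0
    · obtain ⟨ha0, hb0, hc0⟩ := hcond
      rw [goA_cons_pos std A B C check _ ⟨ha0, hb0, hc0⟩]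
      rw [show ((B == (0:Int)) && (A == 0) && (C == 0)) = true from by
        rw [ha0, hb0, hc0]; rfl]
      rw [if_pos rfl]
      by_cases hret : check + 1 > std
      · rw [if_pos hret, if_pos hret]
      · rw [if_neg hret, if_neg hret]
        exact hih1
    · rw [goA_cons_neg std A B C check _ hcond]
      rw [show ((B == (0:Int)) && (A == 0) && (C == 0)) = false from by
        by_cases h1 : A = 0 <;> by_cases h2 : B = 0 <;> by_cases h3 : C = 0 <;>
          simp [h1, h2, h3] <;> tauto]
      rw [if_neg (by simp)]
      exact hih0

theorem alt_eq_mr (rate : List Int) (standard : Int) :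
    check_rate_alt rate standard
      = (decide (mr 0 0 rate - 2 ≤ 0) || decide (mr 0 0 rate - 2 ≤ standard)) := by
  show (decide ((rate.foldl altStep (0, 0)).1 - 2 ≤ 0)
      || decide ((rate.foldl altStep (0, 0)).1 - 2 ≤ standard)) = _
  rw [foldl_eq_mr rate 0 0]

-- ===== VERDICT (by name: the statement is the Claim_ definition above) =====
theorem check_rate_spec : Claim_equal_check_rate := by
  intro rate standard _
  unfold Spec_check_rate
  rw [alt_eq_mr]
  unfold check_rate
  rw [go_eq_goA rate standard (((rate.length : Int) - 1 - 1).toNat) 1 0 (by omega) rfl]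
  rw [show ((1:Int) - 1).toNat = 0 from rfl, List.drop_zero]
  match rate with
  | [] =>
    rw [goA_short standard 0 [] (by simp)]
    simp [mr]
  | [x] =>
    rw [goA_short standard 0 [x] (by simp)]
    by_cases hx : x = 0 <;> simp [mr, hx]
  | a :: b :: s =>
    set ra : Int := if a = 0 then (1:Int) else 0 with hra
    set rb : Int := if b = 0 then ra + 1 else (0:Int) with hrb
    set m : Int := max ra rb with hm
    have hra0 : ¬ a = 0 → ra = 0 := fun ha => by simp [hra, ha]
    have hra1 : a = 0 → ra = 1 := fun ha => by simp [hra, ha]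
    have hrb0 : ¬ b = 0 → rb = 0 := fun hb => by simp [hrb, hb]
    have hrb1 : b = 0 → rb = ra + 1 := fun hb => by simp [hrb, hb]
    have hra01 : ra = 0 ∨ ra = 1 := by by_cases ha : a = 0 <;> simp [hra, ha]
    have hrb02 : 0 ≤ rb ∧ rb ≤ 2 := by
      by_cases hb : b = 0 <;> [rw [hrb1 hb]; rw [hrb0 hb]] <;> omega
    have hmx1 : ra ≤ m := le_max_left ra rb
    have hmx2 : rb ≤ m := le_max_right ra rb
    have hmc := max_choice ra rb
    have step1 : mr 0 0 (a :: b :: s) = mr ra ra (b :: s) := by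
      by_cases ha : a = 0 <;> simp [mr, hra, ha]
    have step2 : mr ra ra (b :: s) = mr rb m s := by
      by_cases hb : b = 0
      · rw [hrb1 hb]
        have hmm : m = max ra (ra + 1) := by rw [hm, hrb1 hb]
        rw [hmm]
        simp [mr, hb]
      · rw [hrb0 hb]
        have hmm : m = ra := by rw [hm, hrb0 hb]; exact max_eq_left (by omega)
        rw [hmm]
        simp [mr, hb]
    rw [goA_main s a b rb m 0 standard (by omega)
      (by constructor
          · intro h; by_contra hb; have := hrb0 hb; omega
          · intro hb; have := hrb1 hb; omega)
      (by intro h; by_contra ha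
          have h0 := hra0 ha
          by_cases hb : b = 0
          · have := hrb1 hb; omega
          · have := hrb0 hb; omega)
      (by intro ha hb; have := hrb1 hb; have := hra1 ha; omega)
      (Or.inr ⟨rfl, hrb02.2⟩) hmx2 (by omega)]
    rw [step1, step2]
    congr 1
    simp only [decide_eq_decide]
    omega
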